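-- pv_equiv track=rewrite | github.com/ook-lab/document-management-system | services/fast-indexer/shared/pipeline/stage_b/b26_gmail_text.py | _format_plain_text
-- ===== SOURCE A (Python) =====
-- def _format_plain_text(text: str) -> str:
--     """
--     プレーンテキストを整形する。
--
--     - 連続する空白行を 1 行に圧縮
--     - 引用行（> で始まる行）をまとめて 1 ブロックに
--     - 末尾空白を除去
--     """
--     if not text or not text.strip():
--         return ''
--
--     lines = text.splitlines()
--     result_parts = []
--     current_para = []
--     in_quote = False
--
--     for line in lines:
--         stripped = line.rstrip()
--
--         # 引用行
--         if stripped.startswith('>'):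
--             if current_para:
--                 result_parts.append('\n'.join(current_para))
--                 current_para = []
--             if not in_quote:
--                 result_parts.append('')  # 引用前に空行
--                 in_quote = True
--             result_parts.append(stripped)
--             continue
--
--         in_quote = False
--
--         # 空行: 段落区切り
--         if not stripped:
--             if current_para:
--                 result_parts.append('\n'.join(current_para))
--                 current_para = []
--             result_parts.append('')
--             continue
--
--         current_para.append(stripped)
--
--     if current_para:
--         result_parts.append('\n'.join(current_para))
--
--     # 連続する空行を 1 行に圧縮
--     final_lines = []
--     prev_blank = False
--     for part in result_parts:
--         if part == '':
--             if not prev_blank: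
--                 final_lines.append('')
--             prev_blank = True
--         else:
--             final_lines.append(part)
--             prev_blank = False
--
--     return '\n'.join(final_lines).strip()
-- ===== SOURCE B (Python) =====
-- def _format_plain_text(text: str) -> str:
--     """Run-based reformatter: classify rstripped lines, walk maximal same-kind runs."""
--     if not text or not text.strip():
--         return ''
--
--     lines = [l.rstrip() for l in text.splitlines()]
--
--     def kind(s):
--         if s.startswith('>'):
--             return 1          # quote
--         if not s:
--             return 0          # blank
--         return 2              # text
--
--     parts = []
--     i, n = 0, len(lines)
--     while i < n:
--         k = kind(lines[i])
--         j = i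
--         while j < n and kind(lines[j]) == k:
--             j += 1
--         run = lines[i:j]
--         if k == 2:
--             parts.append('\n'.join(run))      # one paragraph block
--         elif k == 1:
--             parts.append('')                  # blank line before the quote block
--             parts.extend(run)
--         else:
--             parts.append('')                  # one blank per blank run
--         i = j
--
--     # compress consecutive blank parts (same second pass as before)
--     final_lines = []
--     prev_blank = False
--     for part in parts:
--         if part == '':
--             if not prev_blank:
--                 final_lines.append('')
--             prev_blank = True
--         else:
--             final_lines.append(part)
--             prev_blank = False
--
--     return '\n'.join(final_lines).strip()
-- ===== Notes on version B (the rewrite author's own statement) =====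
-- stated objective: alternative
-- what changed: Replaces A's per-line state machine (current_para buffer plus in_quote flag with deferred flushes) by a run-based scan: each maximal run of same-kind rstripped lines (quote/blank/text) is emitted as one block, keeping the blank-compression pass and final strip.
import Mathlib
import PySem

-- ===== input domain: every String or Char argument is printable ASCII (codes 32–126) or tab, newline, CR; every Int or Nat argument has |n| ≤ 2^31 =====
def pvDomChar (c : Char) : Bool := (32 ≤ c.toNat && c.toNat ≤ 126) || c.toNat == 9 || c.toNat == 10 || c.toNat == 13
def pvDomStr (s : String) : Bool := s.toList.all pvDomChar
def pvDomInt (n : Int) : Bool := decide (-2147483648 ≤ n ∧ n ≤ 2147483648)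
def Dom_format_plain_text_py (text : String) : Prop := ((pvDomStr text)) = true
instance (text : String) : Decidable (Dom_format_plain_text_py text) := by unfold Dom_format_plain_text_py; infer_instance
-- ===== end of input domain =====

-- B is an alternative decomposition of the same normalization: a run-based scan instead of A's
-- per-line state machine; return values are proved equal on every input.

-- ===== PORT A =====
-- the main for-loop of A: state = (result_parts, current_para, in_quote)
def pvAloop : List String → List String → List String → Bool → List String
  | [], parts, para, _ => parts ++ (if para.isEmpty then [] else [PySem.Str.join "\n" para])
  | line :: rest, parts, para, q =>
    let s := PySem.Str.rstrip line
    if PySem.Str.startswith s ">" then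
      pvAloop rest ((parts ++ (if para.isEmpty then [] else [PySem.Str.join "\n" para]))
          ++ (if q then [] else [""]) ++ [s]) [] true
    else
      -- in_quote = False
      if s = "" then
        pvAloop rest ((parts ++ (if para.isEmpty then [] else [PySem.Str.join "\n" para])) ++ [""]) [] false
      else
        pvAloop rest parts (para ++ [s]) false

-- second pass of both programs (identical Python in A and B): compress consecutive '' parts
def pvCompress : List String → List String → Bool → List String
  | [], acc, _ => acc
  | p :: rest, acc, b =>
    if p = "" then
      if b then pvCompress rest acc true else pvCompress rest (acc ++ [""]) true
    else pvCompress rest (acc ++ [p]) false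

def format_plain_text_py (text : String) : String :=
  if text = "" ∨ PySem.Str.strip text = "" then ""
  else
    let lines := PySem.Str.splitlines text
    let parts := pvAloop lines [] [] false
    PySem.Str.strip (PySem.Str.join "\n" (pvCompress parts [] false))

-- ===== PORT B =====
def pvKind (s : String) : Nat :=
  if PySem.Str.startswith s ">" then 1 else if s = "" then 0 else 2

def pvEmit (k : Nat) (run : List String) : List String :=
  if k = 2 then [PySem.Str.join "\n" run]
  else if k = 1 then "" :: run
  else [""]

def pvBloop : List String → List String
  | [] => []
  | l :: t =>
    pvEmit (pvKind l) ((l :: t).takeWhile (fun x => pvKind x == pvKind l))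
      ++ pvBloop ((l :: t).dropWhile (fun x => pvKind x == pvKind l))
  termination_by ls => ls.length
  decreasing_by
    simp only [List.dropWhile_cons, beq_self_eq_true, if_pos]
    exact Nat.lt_succ_of_le (List.length_dropWhile_le _ _)

def format_plain_text_py_alt (text : String) : String :=
  if text = "" ∨ PySem.Str.strip text = "" then ""
  else
    let lines := (PySem.Str.splitlines text).map PySem.Str.rstrip
    let parts := pvBloop lines
    PySem.Str.strip (PySem.Str.join "\n" (pvCompress parts [] false))

-- ===== PRECONDITION & SPEC =====
def Spec_format_plain_text_py (text : String) (out : String) : Prop := out = format_plain_text_py_alt text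
instance (text : String) (out : String) : Decidable (Spec_format_plain_text_py text out) := by unfold Spec_format_plain_text_py; infer_instance

-- ===== CLAIM (what is proved, stated in full; the proofs are below) =====
def Claim_equal_format_plain_text_py : Prop := ∀ (text : String), Dom_format_plain_text_py text → Spec_format_plain_text_py text (format_plain_text_py text)

-- ===== LEMMAS AND PROOFS =====

-- proof-side helpers ------------------------------------------------------

def pvFlush (para : List String) : List String :=
  if para.isEmpty then [] else [PySem.Str.join "\n" para]

-- accumulator-free form of A's loop over already-rstripped lines
def aL : List String → List String → Bool → List String
  | [], para, _ => pvFlush para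
  | s :: rest, para, q =>
    if pvKind s = 1 then pvFlush para ++ (if q then [] else [""]) ++ [s] ++ aL rest [] true
    else if pvKind s = 0 then pvFlush para ++ [""] ++ aL rest [] false
    else aL rest (para ++ [s]) false

-- accumulator-free form of the compression pass
def cL : List String → Bool → List String
  | [], _ => []
  | p :: rest, b =>
    if p = "" then (if b then cL rest true else "" :: cL rest true) else p :: cL rest false

theorem cL_cons (p : String) (rest : List String) (b : Bool) :
    cL (p :: rest) b
      = if p = "" then (if b then cL rest true else "" :: cL rest true) else p :: cL rest false := rfl

-- prev_blank flag after processing a list of parts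
def pvOutF (xs : List String) (b : Bool) : Bool := xs.foldl (fun _ p => decide (p = "")) b

theorem pvAloop_eq (ls : List String) : ∀ parts para q,
    pvAloop ls parts para q = parts ++ aL (ls.map PySem.Str.rstrip) para q := by
  induction ls with
  | nil => intro parts para q; simp [pvAloop, aL, pvFlush]
  | cons line rest ih =>
    intro parts para q
    simp only [pvAloop, List.map_cons, aL, pvKind]
    by_cases h1 : PySem.Chars.startswith (PySem.Chars.rstrip line.toList) ['>'] = true
    · simp [h1, ih, pvFlush, List.append_assoc]
    · by_cases h0 : PySem.Str.rstrip line = ""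
      · simp [h0, ih, pvFlush, List.append_assoc, PySem.Chars.startswith]
      · simp [h1, h0, ih]

theorem pvCompress_eq (parts : List String) : ∀ acc b,
    pvCompress parts acc b = acc ++ cL parts b := by
  induction parts with
  | nil => intro acc b; simp [pvCompress, cL]
  | cons p rest ih =>
    intro acc b
    by_cases h : p = ""
    · cases b <;> simp [pvCompress, cL, h, ih, List.append_assoc]
    · simp [pvCompress, cL, h, ih, List.append_assoc]

theorem cL_append (xs : List String) : ∀ ys b,
    cL (xs ++ ys) b = cL xs b ++ cL ys (pvOutF xs b) := by
  induction xs with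
  | nil => intro ys b; simp [cL, pvOutF]
  | cons x xs ih =>
    intro ys b
    by_cases h : x = ""
    · cases b <;> simp [cL, h, ih, pvOutF, List.foldl]
    · simp [cL, h, ih, pvOutF, List.foldl]

-- kind facts
theorem pvKind_zero {s : String} (h : pvKind s = 0) : s = "" := by
  unfold pvKind at h; split_ifs at h; assumption

-- A's loop over a maximal run, one lemma per kind ------------------------

theorem aL_text_run (run : List String) : ∀ rest para q, run ≠ [] →
    (∀ x ∈ run, pvKind x = 2) →
    aL (run ++ rest) para q = aL rest (para ++ run) false := by
  induction run with
  | nil => intro _ _ _ h; exact absurd rfl h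
  | cons a run ih =>
    intro rest para q _ hall
    have ha : pvKind a = 2 := hall a (by simp)
    rcases List.eq_nil_or_concat run with h | _
    · subst h; simp [aL, ha]
    · cases run with
      | nil => simp [aL, ha]
      | cons b run' =>
        have : aL ((a :: b :: run') ++ rest) para q
            = aL ((b :: run') ++ rest) (para ++ [a]) false := by
          simp [aL, ha]
        rw [this, ih rest (para ++ [a]) false (by simp)
            (fun x hx => hall x (by simp [hx]))]
        simp [List.append_assoc]

theorem aL_quote_run (run : List String) : ∀ rest para q, run ≠ [] →
    (∀ x ∈ run, pvKind x = 1) →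
    aL (run ++ rest) para q
      = pvFlush para ++ (if q then [] else [""]) ++ run ++ aL rest [] true := by
  induction run with
  | nil => intro _ _ _ h; exact absurd rfl h
  | cons a run ih =>
    intro rest para q _ hall
    have ha : pvKind a = 1 := hall a (by simp)
    cases run with
    | nil => simp [aL, ha]
    | cons b run' =>
      have : aL ((a :: b :: run') ++ rest) para q
          = pvFlush para ++ (if q then [] else [""]) ++ [a] ++ aL ((b :: run') ++ rest) [] true := by
        simp [aL, ha]
      rw [this, ih rest [] true (by simp) (fun x hx => hall x (by simp [hx]))]
      simp [pvFlush, List.append_assoc]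

theorem aL_blank_run (run : List String) : ∀ rest para q, run ≠ [] →
    (∀ x ∈ run, pvKind x = 0) →
    aL (run ++ rest) para q = pvFlush para ++ run ++ aL rest [] false := by
  induction run with
  | nil => intro _ _ _ h; exact absurd rfl h
  | cons a run ih =>
    intro rest para q _ hall
    have ha : pvKind a = 0 := hall a (by simp)
    have ha' : a = "" := pvKind_zero ha
    cases run with
    | nil => simp [aL, ha', pvKind, PySem.Chars.startswith]
    | cons b run' =>
      have : aL ((a :: b :: run') ++ rest) para q
          = pvFlush para ++ [""] ++ aL ((b :: run') ++ rest) [] false := by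
        simp [aL, ha]
      rw [this, ih rest [] false (by simp) (fun x hx => hall x (by simp [hx]))]
      simp [pvFlush, ha', List.append_assoc]

-- compression of a run of blanks
theorem cL_blanks (run : List String) : ∀ X b, run ≠ [] → (∀ x ∈ run, x = "") →
    cL (run ++ X) b = (if b then [] else [""]) ++ cL X true := by
  induction run with
  | nil => intro _ _ h; exact absurd rfl h
  | cons a run ih =>
    intro X b _ hall
    have ha : a = "" := hall a (by simp)
    cases run with
    | nil =>
      rw [ha, List.singleton_append, cL_cons]; cases b <;> simp
    | cons c run' =>
      have := ih X true (by simp) (fun x hx => hall x (by simp [hx]))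
      rw [ha, List.cons_append, cL_cons]
      simp only [List.cons_append] at this
      cases b <;> simp [this]

-- main lemma: compressed parts of A's loop = compressed parts of B's loop
theorem main_lemma : ∀ n (ls : List String), ls.length ≤ n → ∀ para q b,
    (q = true → ∀ l, ls.head? = some l → pvKind l ≠ 1) →
    (para ≠ [] → ∀ l, ls.head? = some l → pvKind l ≠ 2) →
    cL (aL ls para q) b = cL (pvFlush para ++ pvBloop ls) b := by
  intro n
  induction n with
  | zero =>
    intro ls hlen para q b _ _
    have : ls = [] := List.eq_nil_of_length_eq_zero (Nat.le_zero.mp hlen)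
    subst this; simp [aL, pvBloop]
  | succ n ih =>
    intro ls hlen para q b hq hpara
    cases hls : ls with
    | nil => simp [aL, pvBloop]
    | cons l t =>
      subst hls
      set p := fun x => pvKind x == pvKind l with hp
      have hsplit : (l :: t).takeWhile p ++ (l :: t).dropWhile p = l :: t :=
        List.takeWhile_append_dropWhile
      have hrun_ne : (l :: t).takeWhile p ≠ [] := by
        simp [hp]
      have hall : ∀ x ∈ (l :: t).takeWhile p, pvKind x = pvKind l := by
        intro x hx
        have := List.mem_takeWhile_imp hx
        simpa [hp] using this
      have hrest_len : ((l :: t).dropWhile p).length ≤ n := by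
        have h1 : ((l :: t).dropWhile p).length < (l :: t).length := by
          simp only [List.dropWhile_cons, hp, beq_self_eq_true, if_pos]
          exact Nat.lt_succ_of_le (List.length_dropWhile_le _ _)
        omega
      have hrest_head : ∀ l', ((l :: t).dropWhile p).head? = some l' → pvKind l' ≠ pvKind l := by
        intro l' hl'
        have h2 : (l :: t).find? (fun x => !(p x)) = some l' := by
          rw [List.find?_not_eq_head?_dropWhile]; exact hl'
        have := List.find?_some h2
        simpa [hp] using this
      have hBun : pvBloop (l :: t)
          = pvEmit (pvKind l) ((l :: t).takeWhile p) ++ pvBloop ((l :: t).dropWhile p) := by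
        rw [pvBloop]
      rw [hBun]
      conv_lhs => rw [← hsplit]
      -- case on the kind of the first run
      rcases hk2 : pvKind l with _ | _ | _ | k
      · -- blank run
        have hallb : ∀ x ∈ (l :: t).takeWhile p, x = "" := fun x hx =>
          pvKind_zero (by rw [hall x hx, hk2])
        rw [aL_blank_run _ _ _ _ hrun_ne (fun x hx => by rw [hall x hx, hk2])]
        rw [show pvEmit 0 ((l :: t).takeWhile p) = [""] from rfl]
        simp only [List.append_assoc]
        rw [cL_append (pvFlush para), cL_append (pvFlush para)]
        congr 1
        rw [cL_blanks _ _ _ hrun_ne hallb,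
            cL_blanks [""] (pvBloop ((l :: t).dropWhile p)) _ (by simp) (by simp)]
        congr 1
        have := ih ((l :: t).dropWhile p) hrest_len [] false true
          (by simp) (by simp)
        simpa [pvFlush] using this
      · -- quote run
        have hqf : q = false := by
          by_contra h
          exact hq (by simpa using h) l rfl (by rw [hk2])
        rw [aL_quote_run _ _ _ _ hrun_ne (fun x hx => by rw [hall x hx, hk2])]
        rw [hqf]
        rw [show pvEmit (0 + 1) ((l :: t).takeWhile p) = "" :: (l :: t).takeWhile p from rfl]
        have hL : (pvFlush para ++ if false = true then [] else [""])
              ++ (l :: t).takeWhile p ++ aL ((l :: t).dropWhile p) [] true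
            = (pvFlush para ++ "" :: (l :: t).takeWhile p) ++ aL ((l :: t).dropWhile p) [] true := by
          simp
        have hR : pvFlush para ++ (("" :: (l :: t).takeWhile p) ++ pvBloop ((l :: t).dropWhile p))
            = (pvFlush para ++ "" :: (l :: t).takeWhile p) ++ pvBloop ((l :: t).dropWhile p) := by
          simp
        rw [hL, hR,
            cL_append (pvFlush para ++ "" :: (l :: t).takeWhile p) (aL ((l :: t).dropWhile p) [] true) b,
            cL_append (pvFlush para ++ "" :: (l :: t).takeWhile p) (pvBloop ((l :: t).dropWhile p)) b]
        congr 1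
        have := ih ((l :: t).dropWhile p) hrest_len [] true
          (pvOutF (pvFlush para ++ "" :: (l :: t).takeWhile p) b)
          (fun _ l' hl' => by have := hrest_head l' hl'; rw [hk2] at this; exact this)
          (by simp)
        simpa [pvFlush] using this
      · -- text run
        have hpf : para = [] := by
          by_contra h
          exact hpara h l rfl (by rw [hk2])
        rw [hpf]
        rw [aL_text_run _ _ _ _ hrun_ne (fun x hx => by rw [hall x hx, hk2])]
        rw [show pvEmit (0 + 1 + 1) ((l :: t).takeWhile p)
              = [PySem.Str.join "\n" ((l :: t).takeWhile p)] from rfl]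
        have := ih ((l :: t).dropWhile p) hrest_len ((l :: t).takeWhile p) false b
          (by simp)
          (fun _ l' hl' => by have := hrest_head l' hl'; rw [hk2] at this; exact this)
        simp only [List.nil_append]
        rw [this]
        simp [pvFlush, hrun_ne]
      · -- pvKind never exceeds 2
        exfalso
        unfold pvKind at hk2
        split_ifs at hk2 <;> omega

-- ===== VERDICT (by name: the statement is the Claim_ definition above) =====
theorem format_plain_text_py_spec : Claim_equal_format_plain_text_py := by
  intro text _
  unfold Spec_format_plain_text_py format_plain_text_py format_plain_text_py_alt
  by_cases h : text = "" ∨ PySem.Str.strip text = ""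
  · simp [h]
  · simp only [h]
    rw [pvAloop_eq, pvCompress_eq, pvCompress_eq]
    simp only [List.nil_append]
    have := main_lemma ((PySem.Str.splitlines text).map PySem.Str.rstrip).length
      ((PySem.Str.splitlines text).map PySem.Str.rstrip) le_rfl [] false false
      (by simp) (by simp)
    simp only [pvFlush, List.isEmpty_nil, if_pos, List.nil_append] at this
    rw [this]
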